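-- pv_equiv track=rewrite | github.com/sn1elsen/advent_of_code | day02/p2v1.py | has_char
-- ===== SOURCE A (Python) =====
-- def has_char(passwd, char, pos1, pos2):
--     found = 0
--     for i, c in enumerate(passwd):
--         if c == char and i == pos1:
--             found += 1
--         elif c == char and i == pos2:
--             found += 1
--     if found == 1:
--         return True
--     else:
--         return False
-- ===== SOURCE B (Python) =====
-- def has_char(passwd, char, pos1, pos2):
--     matches = set()
--     for p in (pos1, pos2):
--         if 0 <= p < len(passwd) and passwd[p] == char:
--             matches.add(p)
--     return len(matches) == 1
-- ===== Notes on version B (the rewrite author's own statement) =====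
-- stated objective: faster
-- what changed: Instead of scanning every character of passwd and counting hits at pos1/pos2, B directly probes the two candidate positions (with a range guard) and collects the matching ones in a set, so a shared matching position still counts once.
import Mathlib
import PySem

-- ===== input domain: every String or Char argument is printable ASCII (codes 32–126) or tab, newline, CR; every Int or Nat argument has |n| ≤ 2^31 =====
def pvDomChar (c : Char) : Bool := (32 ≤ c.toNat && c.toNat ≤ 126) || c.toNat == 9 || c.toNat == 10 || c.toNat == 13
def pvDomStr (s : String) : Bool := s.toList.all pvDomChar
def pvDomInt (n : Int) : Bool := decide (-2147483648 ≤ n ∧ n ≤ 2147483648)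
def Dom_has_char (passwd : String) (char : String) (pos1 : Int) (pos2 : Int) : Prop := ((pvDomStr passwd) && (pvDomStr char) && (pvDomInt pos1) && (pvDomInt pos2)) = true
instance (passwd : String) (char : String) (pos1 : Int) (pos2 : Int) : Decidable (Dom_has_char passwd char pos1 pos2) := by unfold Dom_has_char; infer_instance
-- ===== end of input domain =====

-- B probes only the two candidate positions (collected in a set) instead of scanning passwd; same return value.


-- ===== PORT A =====
-- the 'for i, c in enumerate(passwd)' loop: i is the running index, found the counter
def hasCharLoop (char : String) (pos1 : Int) (pos2 : Int) : List Char → Int → Int → Int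
  | [], _, found => found
  | c :: rest, i, found =>
      hasCharLoop char pos1 pos2 rest (i + 1)
        (if String.ofList [c] = char ∧ i = pos1 then found + 1
         else if String.ofList [c] = char ∧ i = pos2 then found + 1
         else found)

def has_char (passwd : String) (char : String) (pos1 : Int) (pos2 : Int) : Bool :=
  if hasCharLoop char pos1 pos2 passwd.toList 0 0 = 1 then true else false

-- ===== PORT B =====
def has_char_alt (passwd : String) (char : String) (pos1 : Int) (pos2 : Int) : Bool :=
  let ms : PySem.Set Int :=
    [pos1, pos2].foldl (fun s p =>
      if 0 ≤ p ∧ p < PySem.Str.len passwd ∧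
          (PySem.Str.pyGet? passwd p).any (fun c => String.ofList [c] == char)
      then PySem.Set.add s p else s) PySem.Set.empty
  decide (PySem.Set.len ms = 1)

-- ===== PRECONDITION & SPEC =====
def Spec_has_char (passwd : String) (char : String) (pos1 : Int) (pos2 : Int) (out : Bool) : Prop := out = has_char_alt passwd char pos1 pos2
instance (passwd : String) (char : String) (pos1 : Int) (pos2 : Int) (out : Bool) : Decidable (Spec_has_char passwd char pos1 pos2 out) := by unfold Spec_has_char; infer_instance

-- ===== CLAIM (what is proved, stated in full; the proofs are below) =====
def Claim_equal_has_char : Prop := ∀ (passwd : String) (char : String) (pos1 : Int) (pos2 : Int), Dom_has_char passwd char pos1 pos2 → Spec_has_char passwd char pos1 pos2 (has_char passwd char pos1 pos2)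

-- ===== LEMMAS AND PROOFS =====

-- whether position p (counting from i) of l holds (exactly) char
def hitB (char : String) : List Char → Int → Int → Bool
  | [], _, _ => false
  | c :: rest, i, p => if i = p then String.ofList [c] == char else hitB char rest (i + 1) p

theorem hitB_of_lt (char : String) : ∀ (l : List Char) (i p : Int), p < i → hitB char l i p = false := by
  intro l
  induction l with
  | nil => intro i p _; rfl
  | cons c rest ih =>
      intro i p h
      simp only [hitB]
      rw [if_neg (by omega)]
      exact ih (i + 1) p (by omega)

theorem loop_eq (char : String) (pos1 pos2 : Int) :
    ∀ (l : List Char) (i found : Int),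
      hasCharLoop char pos1 pos2 l i found =
        found + (if hitB char l i pos1 then 1 else 0)
              + (if pos2 ≠ pos1 ∧ hitB char l i pos2 then 1 else 0) := by
  intro l
  induction l with
  | nil => intro i found; simp [hasCharLoop, hitB]
  | cons c rest ih =>
      intro i found
      simp only [hasCharLoop]
      rw [ih]
      have f1 : i = pos1 → hitB char rest (i + 1) pos1 = false := fun h => hitB_of_lt char rest _ _ (by omega)
      have f2 : i = pos2 → hitB char rest (i + 1) pos2 = false := fun h => hitB_of_lt char rest _ _ (by omega)
      by_cases h1 : i = pos1 <;> by_cases h2 : i = pos2 <;>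
        by_cases hc : String.ofList [c] = char <;>
        simp_all [hitB] <;> split_ifs <;> simp_all

-- hitB char l i p is true iff p is a valid index (counting from i) and that element equals char
theorem hitB_true_iff (char : String) :
    ∀ (l : List Char) (i p : Int),
      hitB char l i p = true ↔
        (i ≤ p ∧ p < i + (l.length : Int) ∧
          ((l[(p - i).toNat]?).any (fun c => String.ofList [c] == char)) = true) := by
  intro l
  induction l with
  | nil => intro i p; simp [hitB]
  | cons c rest ih =>
      intro i p
      by_cases h : i = p
      · subst h
        simp only [hitB, sub_self, Int.toNat_zero, List.getElem?_cons_zero,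
          Option.any_some, List.length_cons]
        constructor
        · intro hc; exact ⟨le_refl i, by omega, hc⟩
        · intro hc; exact hc.2.2
      · rw [show hitB char (c :: rest) i p = hitB char rest (i + 1) p from by
            simp [hitB, h], ih]
        constructor
        · rintro ⟨h1, h2, h3⟩
          refine ⟨by omega, by simp only [List.length_cons]; push_cast; omega, ?_⟩
          have hn : (p - i).toNat = (p - (i + 1)).toNat + 1 := by omega
          simpa [hn] using h3
        · rintro ⟨h1, h2, h3⟩
          have h1' : i + 1 ≤ p := by omega
          refine ⟨h1', by simp only [List.length_cons] at h2; push_cast at h2 ⊢; omega, ?_⟩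
          have hn : (p - i).toNat = (p - (i + 1)).toNat + 1 := by omega
          rw [hn] at h3; simpa using h3

theorem has_char_eq_alt (passwd : String) (char : String) (pos1 : Int) (pos2 : Int) :
    has_char passwd char pos1 pos2 = has_char_alt passwd char pos1 pos2 := by
  unfold has_char has_char_alt
  rw [loop_eq]
  have hguard : ∀ p : Int,
      (0 ≤ p ∧ p < PySem.Str.len passwd ∧
        (PySem.Str.pyGet? passwd p).any (fun c => String.ofList [c] == char)) ↔
      hitB char passwd.toList 0 p = true := by
    intro p
    rw [hitB_true_iff char passwd.toList 0 p]
    simp only [PySem.Str.len_eq, PySem.Str.pyGet?_eq, PySem.Chars.pyGet?_eq_listPyGet?,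
      sub_zero, zero_add]
    constructor
    · rintro ⟨h0, h1, h2⟩
      exact ⟨h0, h1, by rwa [PySem.List.pyGet?_of_nonneg _ h0] at h2⟩
    · rintro ⟨h0, h1, h2⟩
      exact ⟨h0, h1, by rwa [PySem.List.pyGet?_of_nonneg _ h0]⟩
  simp only [List.foldl]
  by_cases e1 : hitB char passwd.toList 0 pos1 = true
  · rw [if_pos ((hguard pos1).mpr e1)]
    by_cases e2 : hitB char passwd.toList 0 pos2 = true
    · rw [if_pos ((hguard pos2).mpr e2)]
      by_cases heq : pos2 = pos1
      · subst heq
        have hms : PySem.Set.add (PySem.Set.add PySem.Set.empty pos2) pos2 = [pos2] := by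
          simp [PySem.Set.add, PySem.Set.empty, PySem.Set.contains]
        rw [hms]
        simp [e1, PySem.Set.len]
      · have hms : PySem.Set.add (PySem.Set.add PySem.Set.empty pos1) pos2 = [pos1, pos2] := by
          simp [PySem.Set.add, PySem.Set.empty, PySem.Set.contains, heq]
        rw [hms]
        simp [e1, e2, heq, PySem.Set.len]
    · rw [if_neg (fun h => e2 ((hguard pos2).mp h))]
      have hms : PySem.Set.add PySem.Set.empty pos1 = [pos1] := by
        simp [PySem.Set.add, PySem.Set.empty, PySem.Set.contains]
      rw [hms]
      simp [e1, e2, PySem.Set.len]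
  · rw [if_neg (fun h => e1 ((hguard pos1).mp h))]
    by_cases e2 : hitB char passwd.toList 0 pos2 = true
    · rw [if_pos ((hguard pos2).mpr e2)]
      have hms : PySem.Set.add PySem.Set.empty pos2 = [pos2] := by
        simp [PySem.Set.add, PySem.Set.empty, PySem.Set.contains]
      rw [hms]
      by_cases heq : pos2 = pos1
      · subst heq
        exact absurd e2 e1
      · simp [e1, e2, heq, PySem.Set.len]
    · rw [if_neg (fun h => e2 ((hguard pos2).mp h))]
      simp [e1, e2, PySem.Set.empty, PySem.Set.len]

-- ===== VERDICT (by name: the statement is the Claim_ definition above) =====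
theorem has_char_spec : Claim_equal_has_char := by
  intro passwd char pos1 pos2 _
  unfold Spec_has_char
  exact has_char_eq_alt passwd char pos1 pos2
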